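-- pv_equiv track=rewrite | github.com/Khiem19/liveness_in_MMRS | finale/DFS.py | generate_concurrent_states
-- ===== SOURCE A (Python) =====
-- from itertools import product
--
-- def generate_next_states(robot_pos, path):
--     next_positions = []
--     if robot_pos < len(path):
--         next_positions.append(robot_pos + 1)
--     if robot_pos == len(path):
--         next_positions.append(0)  # Reset to start position after finishing
--     return next_positions
--
-- def is_valid_state(state, paths):
--     position_dict = {}
--     for robot_index, robot_pos in enumerate(state):
--         if robot_pos == 0:
--             continue
--         position_in_path = paths[robot_index][robot_pos - 1]
--         if position_in_path in position_dict:
--             return False, f"Resource conflict at {position_in_path} between robots"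
--         position_dict[position_in_path] = robot_index
--     return True, None
--
-- def generate_concurrent_states(current_state, paths):
--     state_options = [[current_state[i]] for i in range(len(paths))]  # Start with the current state
--     for i, robot_pos in enumerate(current_state):
--         next_positions = generate_next_states(robot_pos, paths[i])
--         for pos in next_positions:
--             new_state = list(current_state)
--             new_state[i] = pos
--             if is_valid_state(tuple(new_state), paths)[0]:
--                 state_options[i].append(pos)
--
--     all_combinations = product(*state_options)
--     valid_states = []
--     for combo in all_combinations:
--         new_state = tuple(combo)
--         if is_valid_state(new_state, paths)[0]:
--             valid_states.append(new_state)
--     return valid_states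
-- ===== SOURCE B (Python) =====
-- from itertools import product  # unused by B; kept module context minimal
--
--
-- def generate_next_states(robot_pos, path):
--     next_positions = []
--     if robot_pos < len(path):
--         next_positions.append(robot_pos + 1)
--     if robot_pos == len(path):
--         next_positions.append(0)  # Reset to start position after finishing
--     return next_positions
--
--
-- def is_valid_state(state, paths):
--     position_dict = {}
--     for robot_index, robot_pos in enumerate(state):
--         if robot_pos == 0:
--             continue
--         position_in_path = paths[robot_index][robot_pos - 1]
--         if position_in_path in position_dict:
--             return False, f"Resource conflict at {position_in_path} between robots"
--         position_dict[position_in_path] = robot_index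
--     return True, None
--
--
-- def _assign(paths, options, i, partial, occupied):
--     # Backtracking: assign robot i one of its options, keeping the set of
--     # path cells already occupied by the nonzero positions chosen so far.
--     if not options:
--         return [tuple(partial)]
--     out = []
--     for pos in options[0]:
--         if pos == 0:
--             out.extend(_assign(paths, options[1:], i + 1, partial + [pos], occupied))
--         else:
--             cell = paths[i][pos - 1]
--             if cell not in occupied:
--                 out.extend(_assign(paths, options[1:], i + 1, partial + [pos],
--                                    occupied | {cell}))
--     return out
--
--
-- def _robot_options(i, current_state, paths):
--     # Options for robot i: stay, plus each valid next position on its own path.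
--     pos = current_state[i]
--     opts = [pos]
--     for nxt in generate_next_states(pos, paths[i]):
--         trial = list(current_state)
--         trial[i] = nxt
--         if is_valid_state(tuple(trial), paths)[0]:
--             opts.append(nxt)
--     return opts
--
--
-- def generate_concurrent_states(current_state, paths):
--     options = [_robot_options(i, current_state, paths) for i in range(len(paths))]
--     return _assign(paths, options, 0, [], set())
-- ===== Notes on version B (the rewrite author's own statement) =====
-- stated objective: alternative
-- what changed: Replaced itertools.product over all option tuples followed by a full is_valid_state check of each tuple with a recursive backtracking enumeration that assigns robots in index order and prunes a partial assignment as soon as a robot's path cell is already occupied.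
-- outside the precondition, e.g. on generate_concurrent_states((1, 1, 1, 5), [[7], [7], [7], [9]]): A returns [], B returns []
import Mathlib
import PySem

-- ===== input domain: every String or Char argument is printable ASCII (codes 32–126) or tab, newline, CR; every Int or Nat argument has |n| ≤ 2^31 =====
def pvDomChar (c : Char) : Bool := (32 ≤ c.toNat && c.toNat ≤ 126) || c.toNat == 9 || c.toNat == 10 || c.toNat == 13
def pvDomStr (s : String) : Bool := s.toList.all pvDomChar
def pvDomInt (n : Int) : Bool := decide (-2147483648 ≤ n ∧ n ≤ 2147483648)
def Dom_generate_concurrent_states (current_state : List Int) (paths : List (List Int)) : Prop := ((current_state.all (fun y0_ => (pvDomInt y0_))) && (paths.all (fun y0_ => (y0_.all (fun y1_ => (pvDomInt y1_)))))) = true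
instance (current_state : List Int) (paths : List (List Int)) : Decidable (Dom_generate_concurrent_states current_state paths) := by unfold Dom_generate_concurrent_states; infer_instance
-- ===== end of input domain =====

-- B replaces A's product-then-filter enumeration by a recursive backtracking enumeration
-- with an incrementally maintained occupied-cell set (alternative algorithm, same results).


-- ===== PORT A =====
-- helpers shared by both Pythons: Source A and Source B contain this code verbatim
-- (generate_next_states, is_valid_state, and the state_options-building loop).

def generate_next_states (robot_pos : Int) (path : List Int) : List Int :=
  (if robot_pos < (path.length : Int) then [robot_pos + 1] else []) ++
  (if robot_pos = (path.length : Int) then [(0 : Int)] else [])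

-- the for-loop of is_valid_state over enumerate(state) with its position_dict and early return
def is_valid_loop (paths : List (List Int)) (d : PySem.Dict Int Int) :
    List (Int × Int) → Bool × Option String
  | [] => (true, none)
  | (j, pos) :: rest =>
    if pos = 0 then is_valid_loop paths d rest
    else
      let cell := PySem.List.pyGetD (PySem.List.pyGetD paths j []) (pos - 1) 0
      if d.contains cell then
        (false, some ("Resource conflict at " ++ PySem.Int.toStr cell ++ " between robots"))
      else is_valid_loop paths (d.insert cell j) rest

def is_valid_state (state : List Int) (paths : List (List Int)) : Bool × Option String :=
  is_valid_loop paths PySem.Dict.empty (PySem.List.enumerate state 0)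

-- state_options = [[current_state[i]] for i in range(len(paths))] then the appending loop
def build_options (current_state : List Int) (paths : List (List Int)) : List (List Int) :=
  (PySem.List.enumerate current_state 0).foldl
    (fun opts p =>
      (generate_next_states p.2 (PySem.List.pyGetD paths p.1 [])).foldl
        (fun opts pos =>
          let new_state := PySem.List.pySetD current_state p.1 pos
          if (is_valid_state new_state paths).1 then
            PySem.List.pySetD opts p.1 (PySem.List.pyGetD opts p.1 [] ++ [pos])
          else opts)
        opts)
    ((PySem.List.pyRange 0 (paths.length : Int) 1).map
      (fun i => [PySem.List.pyGetD current_state i 0]))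

-- hand port of itertools.product(*lists): first list varies slowest (exact order)
def pyProduct : List (List Int) → List (List Int)
  | [] => [[]]
  | o :: rest => o.flatMap (fun p => (pyProduct rest).map (fun c => p :: c))

def generate_concurrent_states (current_state : List Int) (paths : List (List Int)) :
    List (List Int) :=
  let state_options := build_options current_state paths
  let all_combinations := pyProduct state_options
  all_combinations.foldl
    (fun valid_states combo =>
      if (is_valid_state combo paths).1 then valid_states ++ [combo] else valid_states)
    []

-- ===== PORT B =====
-- _robot_options of Source B: robot i's current position plus each valid next position
def robot_options (i : Int) (current_state : List Int) (paths : List (List Int)) : List Int :=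
  let pos := PySem.List.pyGetD current_state i 0
  (generate_next_states pos (PySem.List.pyGetD paths i [])).foldl
    (fun opts nxt =>
      let trial := PySem.List.pySetD current_state i nxt
      if (is_valid_state trial paths).1 then opts ++ [nxt] else opts)
    [pos]

-- _assign of Source B: backtracking over the option lists, robot i's cell checked against `occupied`
def assign_states (paths : List (List Int)) (options : List (List Int)) (i : Int)
    (part : List Int) (occupied : PySem.Set Int) : List (List Int) :=
  match options with
  | [] => [part]
  | o :: rest =>
    o.flatMap (fun pos =>
      if pos = 0 then assign_states paths rest (i + 1) (part ++ [pos]) occupied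
      else
        let cell := PySem.List.pyGetD (PySem.List.pyGetD paths i []) (pos - 1) 0
        if PySem.Set.contains occupied cell then []
        else assign_states paths rest (i + 1) (part ++ [pos]) (PySem.Set.add occupied cell))

def generate_concurrent_states_alt (current_state : List Int) (paths : List (List Int)) :
    List (List Int) :=
  let options := (PySem.List.pyRange 0 (paths.length : Int) 1).map
    (fun i => robot_options i current_state paths)
  assign_states paths options 0 [] PySem.Set.empty

-- ===== PRECONDITION & SPEC =====
-- Pre_ excludes exactly the inputs where Python A raises IndexError: a length mismatch, or a
-- robot position whose path index falls outside Python's (negative-index) range; a few such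
-- out-of-band inputs still return [] because an earlier conflict short-circuits the bad lookup
-- (see cites) -- those accidental returns are excluded too.
def Pre_generate_concurrent_states (current_state : List Int) (paths : List (List Int)) : Prop :=
  current_state.length = paths.length ∧
  ∀ p ∈ current_state.zip paths,
    p.1 = 0 ∨ (1 - (p.2.length : Int) ≤ p.1 ∧ p.1 ≤ (p.2.length : Int))
instance (current_state : List Int) (paths : List (List Int)) :
    Decidable (Pre_generate_concurrent_states current_state paths) := by
  unfold Pre_generate_concurrent_states; infer_instance

def pvWitness_generate_concurrent_states : List Int × List (List Int) :=
  ([1, 0], [[10, 11], [10, 12]])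

def Spec_generate_concurrent_states (current_state : List Int) (paths : List (List Int)) (out : List (List Int)) : Prop := out = generate_concurrent_states_alt current_state paths
instance (current_state : List Int) (paths : List (List Int)) (out : List (List Int)) : Decidable (Spec_generate_concurrent_states current_state paths out) := by unfold Spec_generate_concurrent_states; infer_instance

-- ===== CLAIM (what is proved, stated in full; the proofs are below) =====
def Claim_equal_generate_concurrent_states : Prop := ∀ (current_state : List Int) (paths : List (List Int)), Dom_generate_concurrent_states current_state paths → Pre_generate_concurrent_states current_state paths → Spec_generate_concurrent_states current_state paths (generate_concurrent_states current_state paths)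

-- ===== LEMMAS AND PROOFS =====

-- Backtracking = filter of the Cartesian product, generalized over the already-fixed prefix:
-- `occupied` agreeing with the keys of the dict `d` that is_valid_loop has built on the prefix.
-- option accumulation for robot j, as robot_options' inner fold (proof helper)
def optStep (cs : List Int) (paths : List (List Int)) (e : List Int) (j : Nat) : List Int :=
  (generate_next_states (PySem.List.pyGetD cs (j : Int) 0)
      (PySem.List.pyGetD paths (j : Int) [])).foldl
    (fun e p =>
      if (is_valid_state (PySem.List.pySetD cs (j : Int) p) paths).1 then e ++ [p] else e) e

lemma pySetD_getD_self (xs : List (List Int)) (n : Nat) (h : n < xs.length) :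
    PySem.List.pySetD xs (n : Int) (PySem.List.pyGetD xs (n : Int) []) = xs := by
  simp [PySem.List.pySetD, PySem.List.pySet?_natCast xs n _ h,
    List.getElem?_eq_getElem h, List.set_getElem_self]

lemma pySetD_pySetD (xs : List (List Int)) (n : Nat) (v w : List Int) (h : n < xs.length) :
    PySem.List.pySetD (PySem.List.pySetD xs (n : Int) v) (n : Int) w
      = PySem.List.pySetD xs (n : Int) w := by
  simp only [PySem.List.pySetD]
  rw [PySem.List.pySet?_natCast xs n v h, Option.getD_some,
    PySem.List.pySet?_natCast _ n w (by simpa using h), Option.getD_some,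
    PySem.List.pySet?_natCast xs n w h, Option.getD_some, List.set_set]

lemma length_pySetD (xs : List (List Int)) (n : Nat) (v : List Int) (h : n < xs.length) :
    (PySem.List.pySetD xs (n : Int) v).length = xs.length := by
  simp [PySem.List.pySetD, PySem.List.pySet?_natCast xs n v h]

-- A's inner appending loop only touches index n: it is a set at n of a plain append fold
lemma foldl_pySetD_append (c : Int → Bool) :
    ∀ (l : List Int) (opts : List (List Int)) (n : Nat), n < opts.length →
      l.foldl (fun o p =>
          if c p then PySem.List.pySetD o (n : Int) (PySem.List.pyGetD o (n : Int) [] ++ [p])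
          else o) opts
        = PySem.List.pySetD opts (n : Int)
            (l.foldl (fun e p => if c p then e ++ [p] else e)
              (PySem.List.pyGetD opts (n : Int) [])) := by
  intro l
  induction l with
  | nil => intro opts n h; simp only [List.foldl_nil]; exact (pySetD_getD_self opts n h).symm
  | cons p l ih =>
    intro opts n h
    by_cases hc : c p = true
    · simp only [List.foldl_cons, hc, if_true]
      rw [ih _ n (by rw [length_pySetD _ _ _ h]; exact h)]
      rw [PySem.List.pyGetD_pySetD_natCast _ n n _ _ h, if_pos rfl,
        pySetD_pySetD _ n _ _ h]
    · simp only [List.foldl_cons, hc, Bool.false_eq_true, if_false]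
      exact ih _ n h

-- A's outer loop over enumerate(current_state): each step rewrites exactly its own index
lemma build_loop_eq_mapIdx (cs : List Int) (paths : List (List Int)) :
    ∀ (t : List Int) (k : Nat) (opts : List (List Int)),
      t = cs.drop k → opts.length = cs.length →
      (PySem.List.enumerate t (k : Int)).foldl
        (fun opts p =>
          (generate_next_states p.2 (PySem.List.pyGetD paths p.1 [])).foldl
            (fun opts pos =>
              let new_state := PySem.List.pySetD cs p.1 pos
              if (is_valid_state new_state paths).1 then
                PySem.List.pySetD opts p.1 (PySem.List.pyGetD opts p.1 [] ++ [pos])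
              else opts)
            opts)
        opts
      = opts.mapIdx (fun j e => if k ≤ j then optStep cs paths e j else e) := by
  intro t
  induction t with
  | nil =>
    intro k opts ht hlen
    have hk : cs.length ≤ k := List.drop_eq_nil_iff.mp ht.symm
    simp only [PySem.List.enumerate_nil, List.foldl_nil]
    apply List.ext_getElem (by simp)
    intro j h1 h2
    rw [List.getElem_mapIdx, if_neg (by omega)]
  | cons x t ih =>
    intro k opts ht hlen
    have hk : k < cs.length := by
      by_contra hge
      rw [List.drop_eq_nil_iff.mpr (by omega)] at ht
      exact List.cons_ne_nil x t ht
    have hx : x = cs[k] := by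
      rw [List.drop_eq_getElem_cons hk] at ht
      exact (List.cons_eq_cons.mp ht).1
    have htt : t = cs.drop (k + 1) := by
      rw [List.drop_eq_getElem_cons hk] at ht
      exact (List.cons_eq_cons.mp ht).2
    have hko : k < opts.length := by omega
    rw [PySem.List.enumerate_cons, List.foldl_cons]
    have hstep :
        (generate_next_states x (PySem.List.pyGetD paths (k : Int) [])).foldl
          (fun opts pos =>
            if (is_valid_state (PySem.List.pySetD cs (k : Int) pos) paths).1 then
              PySem.List.pySetD opts (k : Int) (PySem.List.pyGetD opts (k : Int) [] ++ [pos])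
            else opts)
          opts
        = opts.set k (optStep cs paths opts[k] k) := by
      rw [foldl_pySetD_append
            (fun p => (is_valid_state (PySem.List.pySetD cs (k : Int) p) paths).1) _ opts k hko]
      have hgd : PySem.List.pyGetD opts (k : Int) [] = opts[k] := by
        simp [List.getElem?_eq_getElem hko]
      have hcd : PySem.List.pyGetD cs (k : Int) 0 = cs[k] := by
        simp [List.getElem?_eq_getElem hk]
      simp [PySem.List.pySetD, PySem.List.pySet?_natCast _ k _ hko, optStep, hgd, hcd, hx]
    simp only [hstep]
    have : ((k : Int) + 1) = ((k + 1 : Nat) : Int) := by push_cast; ring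
    rw [this, ih (k + 1) _ htt (by simp [hlen])]
    apply List.ext_getElem (by simp)
    intro j h1 h2
    rw [List.getElem_mapIdx, List.getElem_mapIdx]
    simp only [List.getElem_set]
    by_cases hjk : k = j
    · subst hjk
      split_ifs <;> first | rfl | omega
    · simp only [if_neg hjk]
      split_ifs <;> first | rfl | omega

-- the two option-building passes agree (needs one position per path)
lemma build_options_eq (cs : List Int) (paths : List (List Int))
    (hlen : cs.length = paths.length) :
    build_options cs paths
      = (PySem.List.pyRange 0 (paths.length : Int) 1).map
          (fun i => robot_options i cs paths) := by
  unfold build_options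
  have hmain := build_loop_eq_mapIdx cs paths cs 0
    ((PySem.List.pyRange 0 (paths.length : Int) 1).map
      (fun i => [PySem.List.pyGetD cs i 0]))
    (by simp) (by simp [PySem.List.pyRange_zero_natCast, hlen])
  simp only [Nat.cast_zero] at hmain
  rw [hmain, PySem.List.pyRange_zero_natCast]
  apply List.ext_getElem (by simp)
  intro j h1 h2
  simp only [List.getElem_mapIdx, List.getElem_map, List.getElem_range]
  rw [if_pos (Nat.zero_le j)]
  rfl

lemma set_contains_add (occ : PySem.Set Int) (c x : Int) :
    PySem.Set.contains (PySem.Set.add occ c) x = (x == c || PySem.Set.contains occ x) := by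
  by_cases h : x = c <;> simp [PySem.Set.contains, PySem.Set.mem_add, h]

-- Backtracking = filter of the Cartesian product, generalized over the already-fixed prefix:
-- `occupied` agreeing with the keys of the dict `d` that is_valid_loop has built on the prefix.
lemma assign_eq_filter (paths : List (List Int)) :
    ∀ (options : List (List Int)) (i : Int) (part : List Int)
      (occ : PySem.Set Int) (d : PySem.Dict Int Int),
      (∀ c, PySem.Set.contains occ c = d.contains c) →
      assign_states paths options i part occ =
        ((pyProduct options).filter
          (fun s => (is_valid_loop paths d (PySem.List.enumerate s i)).1)).map
          (fun s => part ++ s) := by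
  intro options
  induction options with
  | nil =>
    intro i part occ d _
    simp [assign_states, pyProduct, is_valid_loop, PySem.List.enumerate]
  | cons o rest ih =>
    intro i part occ d hcd
    simp only [assign_states, pyProduct, List.filter_flatMap, List.map_flatMap]
    refine List.flatMap_congr fun pos _ => ?_
    simp only [List.filter_map, List.map_map]
    have hcomp :
        ((fun s => part ++ s) ∘ (fun c => pos :: c)) = fun s => (part ++ [pos]) ++ s := by
      funext s; simp
    by_cases h0 : pos = 0
    · subst h0
      rw [ih (i + 1) (part ++ [(0 : Int)]) occ d hcd, hcomp, if_pos rfl]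
      congr 1
    · set cell := PySem.List.pyGetD (PySem.List.pyGetD paths i []) (pos - 1) 0 with hcell
      by_cases hc : d.contains cell = true
      · have hocc : PySem.Set.contains occ cell = true := by rw [hcd cell]; exact hc
        have hfalse : ∀ s ∈ pyProduct rest,
            ((fun s => (is_valid_loop paths d (PySem.List.enumerate s i)).1) ∘
              (fun c => pos :: c)) s = (fun _ => false) s := by
          intro s _
          simp [Function.comp, PySem.List.enumerate_cons, is_valid_loop, h0, ← hcell, hc]
        have hmem : cell ∈ occ := by simpa [PySem.Set.contains] using hocc
        rw [List.filter_congr hfalse]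
        simp [h0, hmem]
      · have hsetc : PySem.Set.contains occ cell = false := by
          rw [hcd cell]; simpa using hc
        have hcd' : ∀ c, PySem.Set.contains (PySem.Set.add occ cell) c =
            (d.insert cell i).contains c := by
          intro c
          rw [set_contains_add, PySem.Dict.contains_insert, hcd c]
        simp only [if_neg h0, hsetc, Bool.false_eq_true, if_false]
        rw [ih (i + 1) (part ++ [pos]) (PySem.Set.add occ cell) (d.insert cell i) hcd', hcomp]
        congr 1
        refine List.filter_congr fun s _ => ?_
        simp [Function.comp, PySem.List.enumerate_cons, is_valid_loop, h0, ← hcell, hc]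

-- ===== VERDICT (by name: the statement is the Claim_ definition above) =====
theorem generate_concurrent_states_spec : Claim_equal_generate_concurrent_states := by
  intro current_state paths _ hpre
  unfold Spec_generate_concurrent_states
  simp only [generate_concurrent_states, generate_concurrent_states_alt]
  rw [PySem.List.foldl_append_if, ← build_options_eq current_state paths hpre.1]
  rw [assign_eq_filter paths (build_options current_state paths) 0 [] PySem.Set.empty
        PySem.Dict.empty (by intro c; simp)]
  simp [is_valid_state]
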